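-- pv_equiv track=rewrite | github.com/ndavido/PythonProgramming | lecture_8/home_work.py | numbers_names_cities
-- ===== SOURCE A (Python) =====
-- def numbers_names_cities(names, salary, city, num_times):
--     index = 0
--     breaker = 1
--     while True:
--         yield names[index % len(names)]
--         if breaker == num_times:
--             break
--         else:
--             breaker += 1
--         yield salary[index % len(salary)]
--         if breaker == num_times:
--             break
--         else:
--             breaker += 1
--         yield city[index % len(city)]
--         if breaker == num_times:
--             break
--         else:
--             breaker += 1
--         index += 1
-- ===== SOURCE B (Python) =====
-- def numbers_names_cities(names, salary, city, num_times):
--     sources = [names, salary, city]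
--     for c in range(num_times):
--         L = sources[c % 3]
--         yield L[(c // 3) % len(L)]
-- ===== Notes on version B (the rewrite author's own statement) =====
-- stated objective: simpler
-- what changed: The three unrolled yield/breaker blocks of A's while-True loop are replaced by a single for-loop over range(num_times) with one counter c, picking sources[c % 3] and element (c // 3) % len each step.
import Mathlib
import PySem

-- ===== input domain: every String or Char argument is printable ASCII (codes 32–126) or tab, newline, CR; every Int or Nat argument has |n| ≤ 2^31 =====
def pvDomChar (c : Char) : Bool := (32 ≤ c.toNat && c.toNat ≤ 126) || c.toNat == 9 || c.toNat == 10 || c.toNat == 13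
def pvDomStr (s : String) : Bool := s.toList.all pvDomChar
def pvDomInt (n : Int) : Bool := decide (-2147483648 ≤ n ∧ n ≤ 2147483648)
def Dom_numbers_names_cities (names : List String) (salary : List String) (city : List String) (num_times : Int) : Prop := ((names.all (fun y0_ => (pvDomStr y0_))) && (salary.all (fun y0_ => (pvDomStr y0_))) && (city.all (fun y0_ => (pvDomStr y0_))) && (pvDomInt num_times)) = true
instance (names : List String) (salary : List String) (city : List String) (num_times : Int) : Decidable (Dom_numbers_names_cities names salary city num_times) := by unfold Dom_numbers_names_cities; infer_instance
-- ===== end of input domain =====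

-- B replaces A's three unrolled yield/breaker blocks with one loop over a single
-- counter c, picking sources[c % 3] each step (objective: simpler decomposition).
-- Equivalence is about the list of yielded values of the generators.

-- ===== PORT A =====
-- xs[index % len(xs)]: index ≥ 0 here, so Nat-mod indexing; "" stands for the
-- (Pre_-excluded) ZeroDivisionError case of an empty list.
def pvGetCycA (xs : List String) (index : Nat) : String :=
  if xs.isEmpty then "" else xs.getD (index % xs.length) ""

-- A's `while True` loop, fuel-totalised (fuel only makes it total: with
-- fuel = num_times.toNat it runs exactly as A whenever A terminates).
def pvLoopA (names salary city : List String) (num_times : Int) :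
    Nat → Nat → Int → List String
  | 0, _, _ => []
  | fuel+1, index, breaker =>
    pvGetCycA names index ::
      (if breaker = num_times then [] else
        pvGetCycA salary index ::
          (if breaker + 1 = num_times then [] else
            pvGetCycA city index ::
              (if breaker + 2 = num_times then [] else
                pvLoopA names salary city num_times fuel (index + 1) (breaker + 3))))

def numbers_names_cities (names : List String) (salary : List String) (city : List String) (num_times : Int) : List String :=
  pvLoopA names salary city num_times num_times.toNat 0 1

-- ===== PORT B =====
def pvPickB (sources : List (List String)) (c : Nat) : String :=
  let L := sources.getD (c % 3) []
  if L.isEmpty then "" else L.getD ((c / 3) % L.length) ""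

def numbers_names_cities_alt (names : List String) (salary : List String) (city : List String) (num_times : Int) : List String :=
  (List.range num_times.toNat).map (pvPickB [names, salary, city])

-- ===== PRECONDITION & SPEC =====
-- Pre_ excludes exactly the inputs on which A's generator never returns a finite
-- list: num_times < 1 (the break test can never fire, the generator is infinite)
-- and the cases where an indexed list is empty (ZeroDivisionError from `% len`).
def Pre_numbers_names_cities (names : List String) (salary : List String) (city : List String) (num_times : Int) : Prop :=
  1 ≤ num_times ∧ names ≠ [] ∧ (2 ≤ num_times → salary ≠ []) ∧ (3 ≤ num_times → city ≠ [])
instance (names : List String) (salary : List String) (city : List String) (num_times : Int) : Decidable (Pre_numbers_names_cities names salary city num_times) := by unfold Pre_numbers_names_cities; infer_instance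

def pvWitness_numbers_names_cities : List String × List String × List String × Int :=
  (["ann", "bob"], ["100", "200", "300"], ["oslo"], 7)

def Spec_numbers_names_cities (names : List String) (salary : List String) (city : List String) (num_times : Int) (out : List String) : Prop := out = numbers_names_cities_alt names salary city num_times
instance (names : List String) (salary : List String) (city : List String) (num_times : Int) (out : List String) : Decidable (Spec_numbers_names_cities names salary city num_times out) := by unfold Spec_numbers_names_cities; infer_instance

-- ===== CLAIM (what is proved, stated in full; the proofs are below) =====
def Claim_equal_numbers_names_cities : Prop := ∀ (names : List String) (salary : List String) (city : List String) (num_times : Int), Dom_numbers_names_cities names salary city num_times → Pre_numbers_names_cities names salary city num_times → Spec_numbers_names_cities names salary city num_times (numbers_names_cities names salary city num_times)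

-- ===== LEMMAS AND PROOFS =====

lemma pvPickB_three (a b c : List String) (i : Nat) :
    pvPickB [a, b, c] (3 * i) = pvGetCycA a i ∧
    pvPickB [a, b, c] (3 * i + 1) = pvGetCycA b i ∧
    pvPickB [a, b, c] (3 * i + 2) = pvGetCycA c i := by
  have h0m : 3 * i % 3 = 0 := by omega
  have h0d : 3 * i / 3 = i := by omega
  have h1m : (3 * i + 1) % 3 = 1 := by omega
  have h1d : (3 * i + 1) / 3 = i := by omega
  have h2m : (3 * i + 2) % 3 = 2 := by omega
  have h2d : (3 * i + 2) / 3 = i := by omega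
  refine ⟨?_, ?_, ?_⟩ <;>
    simp [pvPickB, pvGetCycA, h0m, h0d, h1m, h1d, h2m, h2d]

lemma pvLoopA_eq (names salary city : List String) :
    ∀ (fuel k i : Nat), 1 ≤ k → k ≤ fuel →
      pvLoopA names salary city ((3 * i + k : Nat) : Int) fuel i ((3 * i : Nat) + 1) =
        (List.range' (3 * i) k).map (pvPickB [names, salary, city]) := by
  intro fuel
  induction fuel with
  | zero => intro k i h1 h2; omega
  | succ f ih =>
    intro k i h1 h2
    obtain ⟨p0, p1, p2⟩ := pvPickB_three names salary city i
    have hrange1 : List.range' (3 * i) k = 3 * i :: List.range' (3 * i + 1) (k - 1) := by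
      conv_lhs => rw [show k = (k - 1) + 1 by omega]
      rw [List.range'_succ]
    simp only [pvLoopA]
    split_ifs with hc1 hc2 hc3
    · -- breaker = num_times : k = 1
      have hk : k = 1 := by push_cast at hc1; omega
      subst hk
      simp [hrange1, p0]
    · -- k = 2
      have hk : k = 2 := by push_cast at hc1 hc2; omega
      subst hk
      have hrange2 : List.range' (3 * i + 1) 1 = [3 * i + 1] := by
        simp [List.range'_succ]
      simp [hrange1, hrange2, p0, p1]
    · -- k = 3
      have hk : k = 3 := by push_cast at hc1 hc2 hc3; omega
      subst hk
      have hrange2 : List.range' (3 * i + 1) 2 = [3 * i + 1, 3 * i + 2] := by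
        simp [List.range'_succ]
      simp [hrange1, hrange2, p0, p1, p2]
    · -- k ≥ 4 : one full iteration, then the induction hypothesis
      have hk : 4 ≤ k := by push_cast at hc1 hc2 hc3; omega
      have hrange2 : List.range' (3 * i + 1) (k - 1) =
          (3 * i + 1) :: (3 * i + 2) :: List.range' (3 * (i + 1)) (k - 3) := by
        conv_lhs => rw [show k - 1 = ((k - 3) + 1) + 1 by omega]
        rw [List.range'_succ, List.range'_succ,
          show 3 * i + 1 + 1 = 3 * i + 2 from by omega,
          show 3 * i + 2 + 1 = 3 * (i + 1) from by omega]
      have hrec := ih (k - 3) (i + 1) (by omega) (by omega)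
      have e1 : (3 * i + k) = (3 * (i + 1) + (k - 3)) := by omega
      have e2 : ((3 * i : Nat) : Int) + 1 + 3 = ((3 * (i + 1) : Nat) : Int) + 1 := by
        push_cast; ring
      rw [hrange1, hrange2]
      simp only [List.map_cons]
      rw [p0, p1, p2, e1, e2, hrec]

-- ===== VERDICT (by name: the statement is the Claim_ definition above) =====
theorem numbers_names_cities_spec : Claim_equal_numbers_names_cities := by
  intro names salary city num_times _ hpre
  obtain ⟨h1, -, -, -⟩ := hpre
  unfold Spec_numbers_names_cities numbers_names_cities numbers_names_cities_alt
  set n := num_times.toNat with hn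
  have hnum : num_times = ((3 * 0 + n : Nat) : Int) := by
    simp [hn]; omega
  have h1n : 1 ≤ n := by omega
  calc pvLoopA names salary city num_times n 0 1
      = pvLoopA names salary city ((3 * 0 + n : Nat) : Int) n 0 (((3 * 0 : Nat) : Int) + 1) := by
        rw [← hnum]; norm_num
    _ = (List.range' (3 * 0) n).map (pvPickB [names, salary, city]) :=
        pvLoopA_eq names salary city n n 0 h1n le_rfl
    _ = (List.range n).map (pvPickB [names, salary, city]) := by
        rw [List.range_eq_range']
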